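-- pv_equiv track=rewrite | github.com/barry800414/master_thesis | dimReduction/LDA_Model.py | calcWordRank
-- ===== SOURCE A (Python) =====
-- def calcWordRank(topicWordList):
--     wordRank = dict()
--     for wordList in topicWordList:
--         for i, w in enumerate(wordList):
--             if w not in wordRank:
--                 wordRank[w] = i
--             else:
--                 wordRank[w] = i if wordRank[w] > i else wordRank[w]
--     return wordRank
-- ===== SOURCE B (Python) =====
-- def calcWordRank(topicWordList):
--     # build-index-then-reduce: collect all positions of each word, then take min
--     collected = {}
--     for wordList in topicWordList:
--         for i, w in enumerate(wordList):
--             collected.setdefault(w, []).append(i)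
--     return {w: min(ps) for w, ps in collected.items()}
-- ===== Notes on version B (the rewrite author's own statement) =====
-- stated objective: alternative
-- what changed: B replaces A's single-pass running-minimum update with a two-phase decomposition: first group every position of each word into a dict of lists, then reduce each list to its minimum in a separate pass.
import Mathlib
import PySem

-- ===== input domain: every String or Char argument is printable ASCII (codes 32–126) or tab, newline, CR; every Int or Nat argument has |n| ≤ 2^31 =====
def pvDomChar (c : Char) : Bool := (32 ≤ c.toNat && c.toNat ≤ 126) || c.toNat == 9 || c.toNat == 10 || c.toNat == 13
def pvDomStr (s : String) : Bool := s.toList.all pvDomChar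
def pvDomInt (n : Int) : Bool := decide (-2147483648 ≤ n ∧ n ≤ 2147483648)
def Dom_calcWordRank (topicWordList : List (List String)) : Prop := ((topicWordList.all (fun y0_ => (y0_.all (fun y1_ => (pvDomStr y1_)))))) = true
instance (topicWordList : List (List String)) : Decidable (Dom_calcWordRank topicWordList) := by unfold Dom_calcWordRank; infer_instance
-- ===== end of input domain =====

-- B rebuilds the result by first grouping every position of each word into lists, then
-- reducing each list to its minimum in a second pass (alternative decomposition, same cost).


-- ===== PORT A =====
-- one inner-loop step of A: running minimum kept in the dict
def pvStepA (wordRank : PySem.Dict String Int) (p : Int × String) : PySem.Dict String Int :=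
  match wordRank.get? p.2 with
  | none => wordRank.insert p.2 p.1
  | some v => wordRank.insert p.2 (if v > p.1 then p.1 else v)

def calcWordRank (topicWordList : List (List String)) : List (String × Int) :=
  (topicWordList.foldl
    (fun wordRank wordList => (PySem.List.enumerate wordList).foldl pvStepA wordRank)
    PySem.Dict.empty).items

-- ===== PORT B =====
-- min(ps); ps is always nonempty where B calls it, so the default is unreachable
def pvMinD (ps : List Int) : Int := (PySem.List.min? ps (fun x => x)).getD 0

-- one inner-loop step of B: collected.setdefault(w, []).append(i)
def pvStepB (d : PySem.Dict String (List Int)) (p : Int × String) : PySem.Dict String (List Int) :=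
  d.modify p.2 [] (· ++ [p.1])

def calcWordRank_alt (topicWordList : List (List String)) : List (String × Int) :=
  let collected := topicWordList.foldl
    (fun d wordList => (PySem.List.enumerate wordList).foldl pvStepB d)
    PySem.Dict.empty
  collected.items.map (fun q => (q.1, pvMinD q.2))

-- ===== PRECONDITION & SPEC =====
def Spec_calcWordRank (topicWordList : List (List String)) (out : List (String × Int)) : Prop := out = calcWordRank_alt topicWordList
instance (topicWordList : List (List String)) (out : List (String × Int)) : Decidable (Spec_calcWordRank topicWordList out) := by unfold Spec_calcWordRank; infer_instance

-- ===== CLAIM (what is proved, stated in full; the proofs are below) =====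
def Claim_equal_calcWordRank : Prop := ∀ (topicWordList : List (List String)), Dom_calcWordRank topicWordList → Spec_calcWordRank topicWordList (calcWordRank topicWordList)

-- ===== LEMMAS AND PROOFS =====

-- invariant linking A's running-minimum dict to B's dict of position lists
def pvRel (a : PySem.Dict String Int) (c : PySem.Dict String (List Int)) : Prop :=
  a.items = c.items.map (fun q => (q.1, pvMinD q.2)) ∧
  (∀ q ∈ c.items, q.2 ≠ []) ∧
  c.keys.Nodup

theorem pvGet?_of_items_map {a : PySem.Dict String Int} {c : PySem.Dict String (List Int)}
    (h : a.items = c.items.map (fun q => (q.1, pvMinD q.2))) (k : String) :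
    a.get? k = (c.get? k).map pvMinD := by
  simp only [PySem.Dict.get?, h, List.find?_map]
  have hp : ((fun p : String × Int => p.1 == k) ∘ fun q : String × List Int => (q.1, pvMinD q.2)) = (fun q : String × List Int => q.1 == k) := rfl
  rw [hp]
  cases List.find? (fun q : String × List Int => q.1 == k) c.items <;> simp

theorem pvMinD_singleton (i : Int) : pvMinD [i] = i := by
  simp [pvMinD, PySem.List.min?_id_cons]

theorem pvMinD_append (ps : List Int) (hps : ps ≠ []) (i : Int) :
    pvMinD (ps ++ [i]) = if pvMinD ps > i then i else pvMinD ps := by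
  cases ps with
  | nil => exact absurd rfl hps
  | cons x t =>
    simp only [List.cons_append, pvMinD, PySem.List.min?_id_cons, Option.getD_some,
      List.foldl_append, List.foldl_cons, List.foldl_nil]
    rcases le_or_gt (List.foldl min x t) i with h | h
    · rw [min_eq_left h, if_neg (by omega)]
    · rw [min_eq_right (le_of_lt h), if_pos h]

theorem pvRel_step {a : PySem.Dict String Int} {c : PySem.Dict String (List Int)}
    (h : pvRel a c) (p : Int × String) : pvRel (pvStepA a p) (pvStepB c p) := by
  obtain ⟨hitems, hne, hnd⟩ := h
  have hget := pvGet?_of_items_map hitems p.2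
  unfold pvStepA pvStepB PySem.Dict.modify
  cases hc : c.get? p.2 with
  | none =>
    have hcc : c.contains p.2 = false := (PySem.Dict.get?_eq_none_iff_contains c p.2).mp hc
    have hac : a.contains p.2 = false := by
      rw [PySem.Dict.contains_eq_isSome_get?, hget, hc]; rfl
    rw [hget, hc]
    simp only [Option.map_none]
    refine ⟨?_, ?_, ?_⟩
    · rw [PySem.Dict.items_insert_of_not_contains a _ hac,
        PySem.Dict.items_insert_of_not_contains c _ hcc,
        PySem.Dict.getD_of_get?_eq_none c _ hc]
      simp [hitems, pvMinD_singleton]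
    · intro q hq
      rw [PySem.Dict.items_insert_of_not_contains c _ hcc,
        PySem.Dict.getD_of_get?_eq_none c _ hc] at hq
      rcases List.mem_append.mp hq with h' | h'
      · exact hne q h'
      · simp at h'; subst h'; simp
    · exact PySem.Dict.nodup_keys_insert c _ _ hnd
  | some ps =>
    have hmem : (p.2, ps) ∈ c.items := PySem.Dict.mem_items_of_get?_eq_some c hc
    have hpsne : ps ≠ [] := hne _ hmem
    have hcc : c.contains p.2 = true := by
      rw [PySem.Dict.contains_eq_isSome_get?, hc]; rfl
    have hac : a.contains p.2 = true := by
      rw [PySem.Dict.contains_eq_isSome_get?, hget, hc]; rfl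
    have hgD : c.getD p.2 [] = ps := PySem.Dict.getD_of_get?_eq_some c [] hc
    rw [hget, hc]
    simp only [Option.map_some]
    refine ⟨?_, ?_, ?_⟩
    · rw [PySem.Dict.items_insert_of_contains a _ hac,
        PySem.Dict.items_insert_of_contains c _ hcc, hgD, hitems,
        List.map_map, List.map_map]
      refine List.map_congr_left ?_
      intro q hq
      by_cases hk : q.1 = p.2
      · have : c.get? q.1 = some q.2 := PySem.Dict.get?_of_mem_items c hq hnd
        rw [hk, hc] at this
        have hq2 : q.2 = ps := (Option.some.inj this).symm
        simp only [Function.comp_apply, hk, beq_self_eq_true, if_true, hq2,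
          pvMinD_append ps hpsne p.1]
      · simp [Function.comp, hk]
    · intro q hq
      rw [PySem.Dict.items_insert_of_contains c _ hcc, hgD] at hq
      rcases List.mem_map.mp hq with ⟨q', hq', rfl⟩
      by_cases hk : q'.1 = p.2
      · simp [hk]
      · simpa [hk] using hne q' hq'
    · exact PySem.Dict.nodup_keys_insert c _ _ hnd

theorem pvRel_foldl_inner (l : List (Int × String)) {a : PySem.Dict String Int}
    {c : PySem.Dict String (List Int)} (h : pvRel a c) :
    pvRel (l.foldl pvStepA a) (l.foldl pvStepB c) := by
  induction l generalizing a c with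
  | nil => exact h
  | cons p t ih => exact ih (pvRel_step h p)

theorem pvRel_foldl_outer (tl : List (List String)) {a : PySem.Dict String Int}
    {c : PySem.Dict String (List Int)} (h : pvRel a c) :
    pvRel (tl.foldl (fun d wl => (PySem.List.enumerate wl).foldl pvStepA d) a)
          (tl.foldl (fun d wl => (PySem.List.enumerate wl).foldl pvStepB d) c) := by
  induction tl generalizing a c with
  | nil => exact h
  | cons wl t ih => exact ih (pvRel_foldl_inner _ h)

-- ===== VERDICT (by name: the statement is the Claim_ definition above) =====
theorem calcWordRank_spec : Claim_equal_calcWordRank := by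
  intro tl _
  have h0 : pvRel PySem.Dict.empty PySem.Dict.empty := by
    refine ⟨rfl, ?_, PySem.Dict.nodup_keys_empty⟩
    intro q hq
    simp [PySem.Dict.empty] at hq
  exact (pvRel_foldl_outer tl h0).1
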